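-- pv_equiv track=rewrite | github.com/johnbartlett19/Rubiks | utilities.py | command_string_to_commands
-- ===== SOURCE A (Python) =====
-- def command_string_to_commands(command_string):
--     command_list = []
--     for i in range(len(command_string)):
--         if command_string[i] == ' ' or command_string[i] == "'":
--             continue
--         elif i+1 == len(command_string):
--             command = command_string[i]
--         elif command_string[i+1] == "'":
--             command = command_string[i] + command_string[i+1]
--         else:
--             command = command_string[i]
--         command_list.append(command)
--     return command_list
-- ===== SOURCE B (Python) =====
-- import re
--
-- def command_string_to_commands(command_string):
--     # A command is any char other than space/apostrophe, optionally followed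
--     # by an apostrophe; spaces and stray apostrophes are skipped.
--     return re.findall(r"[^ ']'?", command_string)
-- ===== Notes on version B (the rewrite author's own statement) =====
-- stated objective: idiomatic
-- what changed: Replaced the index-based loop with explicit i+1 lookahead and per-branch string building by a single re.findall regex tokenizer matching one non-space, non-apostrophe character followed by an optional apostrophe.
import Mathlib
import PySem

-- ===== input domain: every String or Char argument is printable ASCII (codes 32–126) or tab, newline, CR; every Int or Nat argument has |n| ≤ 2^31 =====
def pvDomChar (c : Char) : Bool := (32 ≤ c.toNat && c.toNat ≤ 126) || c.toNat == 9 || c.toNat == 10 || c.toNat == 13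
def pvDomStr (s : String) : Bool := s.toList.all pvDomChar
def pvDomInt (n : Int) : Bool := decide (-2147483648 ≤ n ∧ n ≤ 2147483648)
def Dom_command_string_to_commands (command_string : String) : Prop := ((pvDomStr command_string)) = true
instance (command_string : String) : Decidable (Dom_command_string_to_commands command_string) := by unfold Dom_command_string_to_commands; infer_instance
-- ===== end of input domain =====

-- B replaces A's indexed loop with i+1 lookahead by a regex tokenizer (re.findall r"[^ ']'?"); same output, more idiomatic.

-- ===== PORT A =====
-- for i in range(len(s)): skip ' '/'\''; lookahead s[i+1] to build a 1- or 2-char command; append.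
def command_string_to_commands (command_string : String) : List String :=
  let s := command_string.toList
  (PySem.List.pyRange 0 (PySem.Str.len command_string) 1).foldl
    (fun command_list i =>
      let ci := PySem.List.pyGetD s i ' '
      if ci = ' ' ∨ ci = '\'' then command_list
      else if i + 1 = (s.length : Int) then command_list ++ [String.ofList [ci]]
      else if PySem.List.pyGetD s (i + 1) ' ' = '\'' then command_list ++ [String.ofList [ci, '\'']]
      else command_list ++ [String.ofList [ci]]) []

-- ===== PORT B =====
-- Hand port of the regex scan r"[^ ']'?" (exact: the engine scans left to right, skips
-- positions that cannot start a match — space/apostrophe — and greedily takes an optional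
-- apostrophe immediately after a matched char).
def pvScan : List Char → List String
  | [] => []
  | [c] => if c = ' ' ∨ c = '\'' then [] else [String.ofList [c]]
  | c :: c' :: rest =>
    if c = ' ' ∨ c = '\'' then pvScan (c' :: rest)
    else if c' = '\'' then String.ofList [c, '\''] :: pvScan rest
    else String.ofList [c] :: pvScan (c' :: rest)

def command_string_to_commands_alt (command_string : String) : List String :=
  pvScan command_string.toList

-- ===== PRECONDITION & SPEC =====
def Spec_command_string_to_commands (command_string : String) (out : List String) : Prop := out = command_string_to_commands_alt command_string
instance (command_string : String) (out : List String) : Decidable (Spec_command_string_to_commands command_string out) := by unfold Spec_command_string_to_commands; infer_instance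

-- ===== CLAIM (what is proved, stated in full; the proofs are below) =====
def Claim_equal_command_string_to_commands : Prop := ∀ (command_string : String), Dom_command_string_to_commands command_string → Spec_command_string_to_commands command_string (command_string_to_commands command_string)

-- ===== LEMMAS AND PROOFS =====

-- A's loop from index i onward appends exactly the tokens pvScan finds in the suffix s.drop i.
lemma pv_loop_eq (s : List Char) :
    ∀ (k i : Nat) (acc : List String), s.length - i ≤ k →
    (PySem.List.pyRange (i : Int) (s.length : Int) 1).foldl
      (fun command_list j =>
        if PySem.List.pyGetD s j ' ' = ' ' ∨ PySem.List.pyGetD s j ' ' = '\'' then command_list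
        else if j + 1 = (s.length : Int) then command_list ++ [String.ofList [PySem.List.pyGetD s j ' ']]
        else if PySem.List.pyGetD s (j + 1) ' ' = '\'' then command_list ++ [String.ofList [PySem.List.pyGetD s j ' ', '\'']]
        else command_list ++ [String.ofList [PySem.List.pyGetD s j ' ']]) acc
      = acc ++ pvScan (s.drop i) := by
  intro k
  induction k with
  | zero =>
    intro i acc h
    have hle : s.length ≤ i := by omega
    rw [PySem.List.pyRange_one_eq_nil (by exact_mod_cast hle),
        List.drop_eq_nil_of_le hle]
    simp [pvScan]
  | succ k ih =>
    intro i acc h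
    by_cases hi : i < s.length
    · rw [PySem.List.pyRange_one_cons (by exact_mod_cast hi)]
      have hdrop : s.drop i = s[i] :: s.drop (i + 1) := List.drop_eq_getElem_cons hi
      have hget : PySem.List.pyGetD s (i : Int) ' ' = s[i] := by
        rw [PySem.List.pyGetD_natCast]; exact List.getD_eq_getElem s ' ' hi
      simp only [List.foldl_cons, hget]
      have hr1 : ((i : Int) + 1) = ((i + 1 : Nat) : Int) := by push_cast; ring
      by_cases hskip : s[i] = ' ' ∨ s[i] = '\''
      · rw [if_pos hskip, hr1, ih (i + 1) acc (by omega)]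
        by_cases hend : i + 1 < s.length
        · have hdrop1 : s.drop (i + 1) = s[i + 1] :: s.drop (i + 2) :=
            List.drop_eq_getElem_cons hend
          rw [hdrop, hdrop1]
          rcases hskip with hc | hc <;> simp [pvScan, hc]
        · have h2 : s.drop (i + 1) = [] := List.drop_eq_nil_of_le (by omega)
          rw [hdrop, h2]
          rcases hskip with hc | hc <;> simp [pvScan, hc]
      · rw [if_neg hskip]
        by_cases hend : i + 1 = s.length
        · have hcast : (i : Int) + 1 = (s.length : Int) := by exact_mod_cast hend
          rw [if_pos hcast]
          have h2 : s.drop (i + 1) = [] := List.drop_eq_nil_of_le (by omega)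
          rw [PySem.List.pyRange_one_eq_nil (by omega), List.foldl_nil, hdrop, h2]
          rw [not_or] at hskip
          simp [pvScan, hskip.1, hskip.2]
        · have hend' : i + 1 < s.length := by omega
          have hcast : ¬ ((i : Int) + 1 = (s.length : Int)) := by
            intro hc; exact hend (by exact_mod_cast hc)
          rw [if_neg hcast]
          have hget1 : PySem.List.pyGetD s ((i : Int) + 1) ' ' = s[i + 1] := by
            rw [hr1, PySem.List.pyGetD_natCast]
            exact List.getD_eq_getElem s ' ' hend'
          have hdrop1 : s.drop (i + 1) = s[i + 1] :: s.drop (i + 2) :=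
            List.drop_eq_getElem_cons hend'
          rw [not_or] at hskip
          by_cases hq : s[i + 1] = '\''
          · rw [hget1, if_pos hq]
            rw [PySem.List.pyRange_one_cons (by exact_mod_cast hend')]
            simp only [List.foldl_cons, hget1]
            rw [if_pos (Or.inr hq)]
            have hr2 : ((i : Int) + 1) + 1 = ((i + 2 : Nat) : Int) := by push_cast; ring
            rw [hr2, ih (i + 2) _ (by omega)]
            rw [hdrop, hdrop1, hq]
            simp [pvScan, hskip.1, hskip.2]
          · rw [hget1, if_neg hq]
            rw [hr1, ih (i + 1) _ (by omega)]
            rw [hdrop, hdrop1]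
            simp [pvScan, hskip.1, hskip.2, hq]
    · have hle : s.length ≤ i := by omega
      rw [PySem.List.pyRange_one_eq_nil (by exact_mod_cast hle),
          List.drop_eq_nil_of_le hle]
      simp [pvScan]

-- ===== VERDICT (by name: the statement is the Claim_ definition above) =====
theorem command_string_to_commands_spec : Claim_equal_command_string_to_commands := by
  intro cs _
  unfold Spec_command_string_to_commands command_string_to_commands command_string_to_commands_alt
  have h := pv_loop_eq cs.toList cs.toList.length 0 [] (by omega)
  simpa [PySem.Str.len_eq] using h
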